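-- pv_equiv track=rewrite | github.com/vishsangale/codeKatas | katas/lists/level-add-elements.py | update_past
-- ===== SOURCE A (Python) =====
-- def update_past(data, n, current_idx , diff):
--     if diff <= 0:
--         return n
--
--     eq = diff // (current_idx + 1)
--     rem = diff % (current_idx + 1)
--     if eq == 0:
--         return update_past(data, n, current_idx - 1, rem)
--     for i in range(current_idx + 1):
--         if n > 0:
--             data[i] += eq
--             n -= eq
--         else:
--             break
--     return update_past(data, n, current_idx, rem)
-- ===== SOURCE B (Python) =====
-- def update_past(data, n, current_idx, diff):
--     # Iterative rewrite: while-loop over (diff, current_idx), with the inner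
--     # per-element countdown replaced by one arithmetic step (how many prefix
--     # slots get written is computed by a ceiling division, and the prefix is
--     # updated with one slice assignment). Same in-place mutation of data.
--     while diff > 0:
--         eq, rem = divmod(diff, current_idx + 1)
--         if eq == 0:
--             current_idx -= 1
--         else:
--             k = min(current_idx + 1, -(-n // eq)) if n > 0 else 0
--             if k > 0:
--                 data[:k] = [x + eq for x in data[:k]]
--                 n -= k * eq
--         diff = rem
--     return n
-- ===== Notes on version B (the rewrite author's own statement) =====
-- stated objective: alternative
-- what changed: Replaced the quotient/remainder tail recursion with an iterative while-loop that computes how many prefix slots get incremented by one ceiling division and applies it with a single slice assignment, instead of A's per-element inner loop that decrements n and breaks.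
import Mathlib
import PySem

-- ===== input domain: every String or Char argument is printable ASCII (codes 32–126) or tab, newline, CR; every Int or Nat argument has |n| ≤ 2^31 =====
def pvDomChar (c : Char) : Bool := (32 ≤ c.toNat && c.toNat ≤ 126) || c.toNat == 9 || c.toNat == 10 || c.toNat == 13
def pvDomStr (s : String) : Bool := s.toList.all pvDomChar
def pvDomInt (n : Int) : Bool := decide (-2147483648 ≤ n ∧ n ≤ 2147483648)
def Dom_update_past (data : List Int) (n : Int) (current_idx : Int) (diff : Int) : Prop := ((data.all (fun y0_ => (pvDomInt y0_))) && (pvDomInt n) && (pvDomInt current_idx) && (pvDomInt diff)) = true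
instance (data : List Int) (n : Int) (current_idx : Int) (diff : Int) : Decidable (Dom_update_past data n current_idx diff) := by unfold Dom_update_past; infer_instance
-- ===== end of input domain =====

-- B replaces A's quotient/remainder tail recursion (with its per-element inner
-- countdown loop) by an iterative while-loop whose write count is computed by a
-- ceiling division and applied with one slice assignment (objective: alternative).
-- Both versions mutate `data` in place identically on Pre_; the equivalence
-- proved here is about the RETURN value n.

-- termination facts for the ports (cited in decreasing_by)
theorem pv_eqzero_facts (diff b : Int) (hd : 0 < diff) (hb : b ≠ 0)
    (hq : PySem.Int.floordiv diff b = 0) :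
    PySem.Int.mod diff b = diff ∧ 0 < b ∧ diff < b := by
  have h := PySem.Int.floordiv_mul_add_mod diff b
  rw [hq] at h
  have hrem : PySem.Int.mod diff b = diff := by omega
  rcases lt_trichotomy b 0 with hb' | hb' | hb'
  · have := PySem.Int.mod_neg_bounds diff hb'
    omega
  · exact absurd hb' hb

  · have := PySem.Int.mod_lt diff hb'
    omega

theorem pv_qpos (diff b : Int) (hd : 0 < diff) (hb : 0 < b)
    (hq : PySem.Int.floordiv diff b ≠ 0) :
    1 ≤ PySem.Int.floordiv diff b ∧ b ≤ diff ∧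
      0 ≤ PySem.Int.mod diff b ∧ PySem.Int.mod diff b < b := by
  have h := PySem.Int.floordiv_mul_add_mod diff b
  have hr0 := PySem.Int.mod_nonneg diff hb
  have hrlt := PySem.Int.mod_lt diff hb
  rcases lt_or_gt_of_ne hq with hneg | hpos
  · have : PySem.Int.floordiv diff b * b ≤ (-1) * b :=
      mul_le_mul_of_nonneg_right (by omega) (le_of_lt hb)
    omega
  · have : 1 * b ≤ PySem.Int.floordiv diff b * b :=
      mul_le_mul_of_nonneg_right (by omega) (le_of_lt hb)
    omega

theorem pv_rem_lt (diff b : Int) (hd : 0 < diff) (hb : b ≠ 0)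
    (hq : PySem.Int.floordiv diff b ≠ 0) : PySem.Int.mod diff b < diff := by
  rcases lt_or_gt_of_ne hb with hneg | hpos
  · have := PySem.Int.mod_neg_bounds diff hneg
    omega
  · have := pv_qpos diff b hd hpos hq
    omega

-- ===== PORT A =====
-- inner `for i in range(current_idx + 1)` loop of A: reads and writes data[i],
-- subtracts eq from n, breaks when n ≤ 0; none = IndexError
def updateLoop (i : Int) (m : Int) (data : List Int) (n : Int) (eq : Int) :
    Option (List Int × Int) :=
  if i < m then
    if 0 < n then
      match PySem.List.pyGet? data i with
      | none => none
      | some v => updateLoop (i + 1) m (PySem.List.pySetD data i (v + eq)) (n - eq) eq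
    else some (data, n)
  else some (data, n)
termination_by (m - i).toNat
decreasing_by omega

def update_past (data : List Int) (n : Int) (current_idx : Int) (diff : Int) : Int :=
  if diff ≤ 0 then n
  else if current_idx + 1 = 0 then 0  -- ZeroDivisionError in Python (outside Pre_)
  else if PySem.Int.floordiv diff (current_idx + 1) = 0 then
    update_past data n (current_idx - 1) (PySem.Int.mod diff (current_idx + 1))
  else
    match updateLoop 0 (current_idx + 1) data n
        (PySem.Int.floordiv diff (current_idx + 1)) with
    | none => 0  -- IndexError in Python (outside Pre_)
    | some (d, n') => update_past d n' current_idx (PySem.Int.mod diff (current_idx + 1))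
termination_by (diff.toNat, current_idx.toNat)
decreasing_by
  · have h := pv_eqzero_facts diff (current_idx + 1) (by omega) (by assumption) (by assumption)
    have : (PySem.Int.mod diff (current_idx + 1)).toNat = diff.toNat := by omega
    rw [this]
    exact Prod.Lex.right _ (by omega)
  · exact Prod.Lex.left _ _ (by
      have := pv_rem_lt diff (current_idx + 1) (by omega) (by assumption) (by assumption)
      omega)

-- ===== PORT B =====
def update_past_alt (data : List Int) (n : Int) (current_idx : Int) (diff : Int) : Int :=
  -- while diff > 0:
  if 0 < diff then
    match hdm : PySem.Int.divmod? diff (current_idx + 1) with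
    | none => 0  -- ZeroDivisionError in Python (outside Pre_)
    | some (eq, rem) =>
      if eq = 0 then
        update_past_alt data n (current_idx - 1) rem
      else
        let k := if 0 < n then min (current_idx + 1) (-(PySem.Int.floordiv (-n) eq)) else 0
        if 0 < k then
          update_past_alt
            ((PySem.List.slice data none (some k)).map (fun x => x + eq) ++
              PySem.List.slice data (some k) none)
            (n - k * eq) current_idx rem
        else
          update_past_alt data n current_idx rem
  else n
termination_by (diff.toNat, current_idx.toNat)
decreasing_by
  all_goals
    (have hb : current_idx + 1 ≠ 0 := by
      intro h; rw [h] at hdm; simp [PySem.Int.divmod?] at hdm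
     have hdm' : eq = PySem.Int.floordiv diff (current_idx + 1) ∧
         rem = PySem.Int.mod diff (current_idx + 1) := by
       simp [PySem.Int.divmod?, hb] at hdm
       exact ⟨hdm.1.symm, hdm.2.symm⟩)
  · have h := pv_eqzero_facts diff (current_idx + 1) (by omega) hb (by rw [← hdm'.1]; assumption)
    have : rem.toNat = diff.toNat := by omega
    rw [this]
    exact Prod.Lex.right _ (by omega)
  all_goals
    exact Prod.Lex.left _ _ (by
      have := pv_rem_lt diff (current_idx + 1) (by omega) hb (by rw [← hdm'.1]; assumption)
      omega)

-- ===== PRECONDITION & SPEC =====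
-- Pre_ excludes exactly the inputs where the Python A raises: ZeroDivisionError
-- (diff > 0 with current_idx = -1) and IndexError (the distribution loop reaches
-- index len(data) while n is still positive).
def Pre_update_past (data : List Int) (n : Int) (current_idx : Int) (diff : Int) : Prop :=
  0 < diff →
    current_idx ≠ -1 ∧
      (min current_idx (diff - 1) < (data.length : Int) ∨
        n ≤ (data.length : Int) *
          PySem.Int.floordiv diff (min current_idx (diff - 1) + 1))
instance (data : List Int) (n : Int) (current_idx : Int) (diff : Int) :
    Decidable (Pre_update_past data n current_idx diff) := by
  unfold Pre_update_past; infer_instance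

def pvWitness_update_past : List Int × Int × Int × Int := ([1, 2, 3], 5, 2, 4)

def Spec_update_past (data : List Int) (n : Int) (current_idx : Int) (diff : Int) (out : Int) : Prop := out = update_past_alt data n current_idx diff
instance (data : List Int) (n : Int) (current_idx : Int) (diff : Int) (out : Int) : Decidable (Spec_update_past data n current_idx diff out) := by unfold Spec_update_past; infer_instance

-- ===== CLAIM (what is proved, stated in full; the proofs are below) =====
def Claim_equal_update_past : Prop := ∀ (data : List Int) (n : Int) (current_idx : Int) (diff : Int), Dom_update_past data n current_idx diff → Pre_update_past data n current_idx diff → Spec_update_past data n current_idx diff (update_past data n current_idx diff)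

-- ===== LEMMAS AND PROOFS =====

-- how many slots A's inner loop writes (= B's k), as a function of the loop
-- length, the remaining n and the increment eq
def pvCnt (len n eq : Int) : Int :=
  if n ≤ 0 then 0 else min len (-(PySem.Int.floordiv (-n) eq))

theorem pv_ceil_bracket (n eq : Int) (he : 0 < eq) :
    (-(PySem.Int.floordiv (-n) eq) - 1) * eq < n ∧
      n ≤ (-(PySem.Int.floordiv (-n) eq)) * eq :=
  (PySem.Int.neg_floordiv_neg_eq_iff_of_pos he).mp rfl

theorem pv_ceil_pos (n eq : Int) (hn : 0 < n) (he : 0 < eq) :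
    1 ≤ -(PySem.Int.floordiv (-n) eq) := by
  obtain ⟨h1, h2⟩ := pv_ceil_bracket n eq he
  by_contra h
  have : (-(PySem.Int.floordiv (-n) eq)) * eq ≤ 0 * eq :=
    mul_le_mul_of_nonneg_right (by omega) (le_of_lt he)
  omega

theorem pv_cnt_succ (m n eq : Int) (hm : 0 ≤ m) (hn : 0 < n) (he : 0 < eq) :
    pvCnt (m + 1) n eq = pvCnt m (n - eq) eq + 1 := by
  obtain ⟨hb1, hb2⟩ := pv_ceil_bracket n eq he
  have hc1 := pv_ceil_pos n eq hn he
  by_cases hne : n - eq ≤ 0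
  · -- n ≤ eq: the loop writes exactly one slot
    have hceq : -(PySem.Int.floordiv (-n) eq) = 1 := by
      by_contra hne1
      have h2 : 2 ≤ -(PySem.Int.floordiv (-n) eq) := by omega
      have : 1 * eq ≤ (-(PySem.Int.floordiv (-n) eq) - 1) * eq :=
        mul_le_mul_of_nonneg_right (by omega) (le_of_lt he)
      omega
    simp only [pvCnt, if_neg (by omega : ¬ n ≤ 0), if_pos hne, hceq]
    omega
  · have hc' := pv_ceil_bracket (n - eq) eq he
    have hstep : -(PySem.Int.floordiv (-(n - eq)) eq) = -(PySem.Int.floordiv (-n) eq) - 1 := by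
      rw [PySem.Int.neg_floordiv_neg_eq_iff_of_pos he]
      constructor
      · nlinarith [hb1]
      · nlinarith [hb2]
    simp only [pvCnt, if_neg (by omega : ¬ n ≤ 0), if_neg hne, hstep]
    omega

theorem pv_loop (t : Nat) :
    ∀ (j : Int) (data : List Int) (n eq : Int), 0 < eq → 0 ≤ j →
      (∀ i : Int, j ≤ i → i < j + t → 0 < n - (i - j) * eq → i < (data.length : Int)) →
      ∃ d, updateLoop j (j + t) data n eq
            = some (d, n - eq * pvCnt t n eq) ∧ d.length = data.length := by
  induction t with
  | zero =>
    intro j data n eq he hj hcond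
    rw [updateLoop, if_neg (by omega : ¬ j < j + ((0 : Nat) : Int))]
    refine ⟨data, ?_, rfl⟩
    have hcnt : pvCnt ((0 : Nat) : Int) n eq = 0 := by
      unfold pvCnt
      split
      · rfl
      · have := pv_ceil_pos n eq (by omega) he
        omega
    rw [hcnt]
    ring_nf
  | succ t ih =>
    intro j data n eq he hj hcond
    rw [updateLoop, if_pos (by push_cast; omega : j < j + ((t + 1 : Nat) : Int))]
    by_cases hn : 0 < n
    · -- n > 0: the head index j is written
      have hjlen : j < (data.length : Int) := by
        apply hcond j le_rfl (by push_cast; omega)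
        simp [hn]
      have hget : PySem.List.pyGet? data j = some (data[j.toNat]'(by omega)) := by
        simp only [PySem.List.pyGet?, PySem.List.pyIdx?, if_pos hj,
          if_pos (by exact_mod_cast hjlen), Option.bind_some]
        exact List.getElem?_eq_getElem (by omega)
      have hrange : j + ((t + 1 : Nat) : Int) = (j + 1) + ((t : Nat) : Int) := by
        push_cast; ring
      obtain ⟨d, hl, hlen⟩ := ih (j + 1)
        (PySem.List.pySetD data j ((data[j.toNat]'(by omega)) + eq)) (n - eq) eq he
        (by omega)
        (by
          intro i hi1 hi2 hi3
          rw [PySem.List.length_pySetD]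
          apply hcond i (by omega) (by push_cast at hi2 ⊢; omega)
          have : (i - (j + 1)) * eq = (i - j) * eq - eq := by ring
          omega)
      refine ⟨d, ?_, by rw [hlen, PySem.List.length_pySetD]⟩
      rw [if_pos hn, hget]
      dsimp only
      rw [hrange, hl]
      have hcnt : pvCnt ((t + 1 : Nat) : Int) n eq = pvCnt ((t : Nat) : Int) (n - eq) eq + 1 := by
        have := pv_cnt_succ ((t : Nat) : Int) n eq (by omega) hn he
        push_cast at this ⊢
        omega
      rw [hcnt]
      ring_nf
    · -- n ≤ 0: loop breaks immediately
      refine ⟨data, ?_, rfl⟩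
      have hcnt : pvCnt ((t + 1 : Nat) : Int) n eq = 0 := by
        unfold pvCnt
        rw [if_pos (by omega)]
      rw [hcnt, if_neg hn]
      ring_nf

-- B's value depends on data only through its length
theorem pv_alt_len (data data2 : List Int) (n current_idx diff : Int)
    (h : data.length = data2.length) :
    update_past_alt data n current_idx diff = update_past_alt data2 n current_idx diff := by
  rw [update_past_alt, update_past_alt]
  by_cases hd : 0 < diff
  case neg => rw [if_neg hd, if_neg hd]
  case pos =>
  rw [if_pos hd, if_pos hd]
  split
  · rfl
  · rename_i eq rem heq
    have hb : current_idx + 1 ≠ 0 := by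
      intro h0
      rw [h0] at heq
      simp [PySem.Int.divmod?] at heq
    have heqv : eq = PySem.Int.floordiv diff (current_idx + 1) ∧
        rem = PySem.Int.mod diff (current_idx + 1) := by
      simp only [PySem.Int.divmod?, if_neg hb, Option.some.injEq, Prod.mk.injEq] at heq
      exact ⟨heq.1.symm, heq.2.symm⟩
    obtain ⟨rfl, rfl⟩ := heqv
    dsimp only
    by_cases hq : PySem.Int.floordiv diff (current_idx + 1) = 0
    · rw [if_pos hq, if_pos hq]
      exact pv_alt_len data data2 n (current_idx - 1) (PySem.Int.mod diff (current_idx + 1)) h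
    · rw [if_neg hq, if_neg hq]
      set k := if 0 < n then
          min (current_idx + 1) (-PySem.Int.floordiv (-n) (PySem.Int.floordiv diff (current_idx + 1)))
        else 0 with hkdef
      by_cases hk : 0 < k
      · rw [if_pos hk, if_pos hk]
        apply pv_alt_len _ _ _ _ _ _
        have hk0 : (0 : Int) ≤ k := le_of_lt hk
        rw [PySem.List.slice_to _ hk0, PySem.List.slice_to _ hk0,
          PySem.List.slice_from _ hk0, PySem.List.slice_from _ hk0]
        simp [List.length_append, List.length_take, List.length_drop, h]
      · rw [if_neg hk, if_neg hk]
        exact pv_alt_len data data2 n current_idx (PySem.Int.mod diff (current_idx + 1)) h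
termination_by (diff.toNat, current_idx.toNat)
decreasing_by
  · have h1 := pv_eqzero_facts diff (current_idx + 1) (by omega) hb hq
    have : (PySem.Int.mod diff (current_idx + 1)).toNat = diff.toNat := by omega
    rw [this]
    exact Prod.Lex.right _ (by omega)
  all_goals
    exact Prod.Lex.left _ _ (by
      have := pv_rem_lt diff (current_idx + 1) (by omega) hb hq
      omega)

theorem pv_main (data : List Int) (n current_idx diff : Int)
    (hs : Pre_update_past data n current_idx diff) :
    update_past data n current_idx diff = update_past_alt data n current_idx diff := by
  by_cases hd : diff ≤ 0
  · rw [update_past, update_past_alt, if_pos hd, if_neg (by omega)]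
  · have hd' : 0 < diff := by omega
    obtain ⟨hcm1, hsafe⟩ := hs hd'
    have hb : current_idx + 1 ≠ 0 := by omega
    have hdm : PySem.Int.divmod? diff (current_idx + 1)
        = some (PySem.Int.floordiv diff (current_idx + 1), PySem.Int.mod diff (current_idx + 1)) := by
      simp only [PySem.Int.divmod?, if_neg hb]
      rfl
    rw [update_past, update_past_alt, if_neg hd, if_neg hb, if_pos hd']
    by_cases hq : PySem.Int.floordiv diff (current_idx + 1) = 0
    · -- eq == 0: current_idx is decremented, diff is unchanged (rem = diff)
      rw [if_pos hq]
      obtain ⟨hrem, hbpos, hlt⟩ := pv_eqzero_facts diff (current_idx + 1) hd' hb hq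
      split
      · rename_i heq
        rw [heq] at hdm
        exact absurd hdm (by simp)
      · rename_i eq rem heq
        rw [hdm] at heq
        simp only [Option.some.injEq, Prod.mk.injEq] at heq
        obtain ⟨rfl, rfl⟩ := heq
        rw [if_pos hq]
        apply pv_main
        intro hr
        refine ⟨by omega, ?_⟩
        rw [hrem]
        have hminr : min (current_idx - 1) (diff - 1) = min current_idx (diff - 1) := by omega
        rw [hminr]
        exact hsafe
    · -- eq ≠ 0
      rw [if_neg hq]
      by_cases hbpos : 0 < current_idx + 1
      case neg =>
        -- current_idx + 1 < 0: empty range, rem ≤ 0, both return n next step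
        have hbneg : current_idx + 1 < 0 := by omega
        have hrle := PySem.Int.mod_neg_bounds diff hbneg
        have hPre' : Pre_update_past data n current_idx (PySem.Int.mod diff (current_idx + 1)) := by
          intro hr
          omega
        rw [updateLoop, if_neg (by omega : ¬ (0:Int) < current_idx + 1)]
        dsimp only
        split
        · rename_i heq
          rw [heq] at hdm
          exact absurd hdm (by simp)
        · rename_i eq rem heq
          rw [hdm] at heq
          simp only [Option.some.injEq, Prod.mk.injEq] at heq
          obtain ⟨rfl, rfl⟩ := heq
          rw [if_neg hq]
          try dsimp only
          have hknp : ¬ (0 : Int) < (if 0 < n then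
              min (current_idx + 1)
                (-PySem.Int.floordiv (-n) (PySem.Int.floordiv diff (current_idx + 1)))
            else 0) := by
            split <;> omega
          rw [if_neg hknp]
          exact pv_main data n current_idx (PySem.Int.mod diff (current_idx + 1)) hPre'
      case pos =>
        obtain ⟨hq1, hble, hr0, hrlt⟩ := pv_qpos diff (current_idx + 1) hd' hbpos hq
        have hmin : min current_idx (diff - 1) = current_idx := by omega
        rw [hmin] at hsafe
        -- run the loop lemma for A's inner loop
        have hrange_cond : ∀ i : Int, 0 ≤ i → i < 0 + (((current_idx + 1).toNat : Nat) : Int) →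
            0 < n - (i - 0) * PySem.Int.floordiv diff (current_idx + 1) →
            i < (data.length : Int) := by
          intro i h1 h2 h3
          have h2' : i < current_idx + 1 := by omega
          have h3' : 0 < n - i * PySem.Int.floordiv diff (current_idx + 1) := by
            have hring : (i - 0) * PySem.Int.floordiv diff (current_idx + 1)
                = i * PySem.Int.floordiv diff (current_idx + 1) := by ring
            omega
          rcases hsafe with hL | hn2
          · omega
          · by_contra hge
            have hmul : (data.length : Int) * PySem.Int.floordiv diff (current_idx + 1)
                ≤ i * PySem.Int.floordiv diff (current_idx + 1) :=
              mul_le_mul_of_nonneg_right (by omega) (by omega)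
            omega
        obtain ⟨d, hloop, hdlen⟩ := pv_loop (current_idx + 1).toNat 0 data n
          (PySem.Int.floordiv diff (current_idx + 1)) (by omega) le_rfl hrange_cond
        have hc2 : (((current_idx + 1).toNat : Nat) : Int) = current_idx + 1 := by omega
        rw [hc2, zero_add] at hloop
        rw [hloop]
        dsimp only
        -- the recursive state on A's side
        have hPre' : Pre_update_past d
            (n - PySem.Int.floordiv diff (current_idx + 1)
              * pvCnt (current_idx + 1) n (PySem.Int.floordiv diff (current_idx + 1)))
            current_idx (PySem.Int.mod diff (current_idx + 1)) := by
          intro hr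
          refine ⟨by omega, ?_⟩
          rw [hdlen]
          have hminr : min current_idx (PySem.Int.mod diff (current_idx + 1) - 1)
              = PySem.Int.mod diff (current_idx + 1) - 1 := by omega
          rw [hminr]
          have hsimp : PySem.Int.mod diff (current_idx + 1) - 1 + 1
              = PySem.Int.mod diff (current_idx + 1) := by ring
          rw [hsimp, PySem.Int.floordiv_eq_ediv_of_pos hr, Int.ediv_self (by omega), mul_one]
          rcases hsafe with hL | hn2
          · left; omega
          · by_cases hn : 0 < n
            · obtain ⟨hbr1, hbr2⟩ := pv_ceil_bracket n (PySem.Int.floordiv diff (current_idx + 1)) (by omega)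
              by_cases hcs : -PySem.Int.floordiv (-n) (PySem.Int.floordiv diff (current_idx + 1))
                  ≤ current_idx + 1
              · right
                have hC : pvCnt (current_idx + 1) n (PySem.Int.floordiv diff (current_idx + 1))
                    = -PySem.Int.floordiv (-n) (PySem.Int.floordiv diff (current_idx + 1)) := by
                  unfold pvCnt
                  rw [if_neg (by omega)]
                  omega
                rw [hC]
                have hcomm : PySem.Int.floordiv diff (current_idx + 1)
                      * -PySem.Int.floordiv (-n) (PySem.Int.floordiv diff (current_idx + 1))
                    = -PySem.Int.floordiv (-n) (PySem.Int.floordiv diff (current_idx + 1))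
                      * PySem.Int.floordiv diff (current_idx + 1) := by ring
                omega
              · left
                have hlt2 : (-PySem.Int.floordiv (-n) (PySem.Int.floordiv diff (current_idx + 1)) - 1)
                    < (data.length : Int) := by
                  apply lt_of_mul_lt_mul_right _ (by omega :
                    (0 : Int) ≤ PySem.Int.floordiv diff (current_idx + 1))
                  omega
                omega
            · right
              have hC : pvCnt (current_idx + 1) n (PySem.Int.floordiv diff (current_idx + 1)) = 0 := by
                unfold pvCnt
                rw [if_pos (by omega)]
              rw [hC]
              omega
        -- B's side
        split
        · rename_i heq
          rw [heq] at hdm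
          exact absurd hdm (by simp)
        · rename_i eq rem heq
          rw [hdm] at heq
          simp only [Option.some.injEq, Prod.mk.injEq] at heq
          obtain ⟨rfl, rfl⟩ := heq
          rw [if_neg hq]
          try dsimp only
          by_cases hn : 0 < n
          · have hc1 := pv_ceil_pos n (PySem.Int.floordiv diff (current_idx + 1)) hn (by omega)
            have hkpos : (0 : Int) < (if 0 < n then
                min (current_idx + 1)
                  (-PySem.Int.floordiv (-n) (PySem.Int.floordiv diff (current_idx + 1)))
              else 0) := by
              rw [if_pos hn]
              omega
            rw [if_pos hkpos, if_pos hn]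
            have hkC : min (current_idx + 1)
                  (-PySem.Int.floordiv (-n) (PySem.Int.floordiv diff (current_idx + 1)))
                = pvCnt (current_idx + 1) n (PySem.Int.floordiv diff (current_idx + 1)) := by
              unfold pvCnt
              rw [if_neg (by omega)]
            rw [hkC]
            have hnarg : n - pvCnt (current_idx + 1) n (PySem.Int.floordiv diff (current_idx + 1))
                  * PySem.Int.floordiv diff (current_idx + 1)
                = n - PySem.Int.floordiv diff (current_idx + 1)
                  * pvCnt (current_idx + 1) n (PySem.Int.floordiv diff (current_idx + 1)) := by ring
            rw [hnarg]
            refine (pv_main d _ current_idx (PySem.Int.mod diff (current_idx + 1)) hPre').trans ?_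
            apply pv_alt_len
            have hk0 : (0 : Int) ≤ pvCnt (current_idx + 1) n (PySem.Int.floordiv diff (current_idx + 1)) := by
              unfold pvCnt
              rw [if_neg (by omega)]
              omega
            rw [PySem.List.slice_to _ hk0, PySem.List.slice_from _ hk0]
            simp [hdlen]
            omega
          · have hknp : ¬ (0 : Int) < (if 0 < n then
                min (current_idx + 1)
                  (-PySem.Int.floordiv (-n) (PySem.Int.floordiv diff (current_idx + 1)))
              else 0) := by
              rw [if_neg hn]
              omega
            rw [if_neg hknp]
            have hC : pvCnt (current_idx + 1) n (PySem.Int.floordiv diff (current_idx + 1)) = 0 := by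
              unfold pvCnt
              rw [if_pos (by omega)]
            rw [hC, mul_zero, sub_zero]
            refine (pv_main d n current_idx (PySem.Int.mod diff (current_idx + 1)) ?_).trans ?_
            · rw [hC, mul_zero, sub_zero] at hPre'
              exact hPre'
            · exact pv_alt_len d data n current_idx (PySem.Int.mod diff (current_idx + 1)) hdlen
termination_by (diff.toNat, current_idx.toNat)
decreasing_by
  · have h1 := pv_eqzero_facts diff (current_idx + 1) (by omega) hb hq
    have : (PySem.Int.mod diff (current_idx + 1)).toNat = diff.toNat := by omega
    rw [this]
    exact Prod.Lex.right _ (by omega)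
  all_goals
    exact Prod.Lex.left _ _ (by
      have := pv_rem_lt diff (current_idx + 1) (by omega) hb hq
      omega)

-- ===== VERDICT (by name: the statement is the Claim_ definition above) =====
theorem update_past_spec : Claim_equal_update_past := by
  intro data n current_idx diff _ hpre
  unfold Spec_update_past
  exact pv_main data n current_idx diff hpre
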